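-- pv_equiv track=rewrite | github.com/alexis-michaud/na | SCRIPTS/generate_lc.py | apply_rule_5
-- ===== SOURCE A (Python) =====
-- def apply_rule_5(syllables_nb, tones):
--     """Rule 5: All syllables following a HL or ML sequence receive L tone.
--     """
--     new_tones = list(tones)
--     for i in range (0, len(tones) - 1):
--         if tones[i] == "HL" or tones[i] == "ML":
--             for j in range (i + 1, len(tones)):
--                 new_tones[j] = "L"
--             break
--     return new_tones
-- ===== SOURCE B (Python) =====
-- def apply_rule_5(syllables_nb, tones):
--     """Rule 5: All syllables following a HL or ML sequence receive L tone."""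
--     new_tones = []
--     triggered = False
--     n = len(tones)
--     for i, t in enumerate(tones):
--         new_tones.append("L" if triggered else t)
--         if not triggered and i + 1 < n and t in ("HL", "ML"):
--             triggered = True
--     return new_tones
-- ===== Notes on version B (the rewrite author's own statement) =====
-- stated objective: simpler
-- what changed: Replaces the outer index search with a nested fill loop and break by one forward pass that builds the output with a boolean 'triggered' flag.
import Mathlib
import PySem

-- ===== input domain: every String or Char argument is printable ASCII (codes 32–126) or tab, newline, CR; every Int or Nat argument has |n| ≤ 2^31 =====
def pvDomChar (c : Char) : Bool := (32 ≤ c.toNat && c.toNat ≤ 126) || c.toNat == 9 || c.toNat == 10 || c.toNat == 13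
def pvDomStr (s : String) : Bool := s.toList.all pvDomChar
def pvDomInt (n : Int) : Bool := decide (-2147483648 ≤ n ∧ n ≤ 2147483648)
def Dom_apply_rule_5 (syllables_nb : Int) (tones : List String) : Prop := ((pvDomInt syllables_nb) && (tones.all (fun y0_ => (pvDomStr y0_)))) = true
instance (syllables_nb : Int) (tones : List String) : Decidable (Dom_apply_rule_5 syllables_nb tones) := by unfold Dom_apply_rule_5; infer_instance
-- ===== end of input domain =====

-- B replaces A's outer index search + inner fill-with-break by a single forward pass
-- with a boolean 'triggered' flag (objective: simpler).


-- ===== PORT A =====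
-- outer loop 'for i in range(0, len(tones)-1): … break' with the inner fill
-- 'for j in range(i+1, len(tones)): new_tones[j] = "L"' as a foldl over the range
def aLoopA (tones new_tones : List String) (i : Nat) : List String :=
  if i < tones.length - 1 then
    if tones.getD i "" = "HL" ∨ tones.getD i "" = "ML" then
      (List.range' (i + 1) (tones.length - (i + 1))).foldl
        (fun acc j => acc.set j "L") new_tones
    else aLoopA tones new_tones (i + 1)
  else new_tones
termination_by tones.length - i

def apply_rule_5 (_syllables_nb : Int) (tones : List String) : List String :=
  aLoopA tones tones 0

-- ===== PORT B =====
-- single pass: emit "L" once triggered, else the tone itself; a tone at a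
-- non-final index equal to "HL"/"ML" sets the flag
def bLoopB (n i : Nat) (triggered : Bool) : List String → List String
  | [] => []
  | t :: rest =>
      (if triggered then "L" else t) ::
        bLoopB n (i + 1) (triggered || (decide (i + 1 < n) && (t == "HL" || t == "ML"))) rest

def apply_rule_5_alt (_syllables_nb : Int) (tones : List String) : List String :=
  bLoopB tones.length 0 false tones

-- ===== PRECONDITION & SPEC =====
def Spec_apply_rule_5 (syllables_nb : Int) (tones : List String) (out : List String) : Prop := out = apply_rule_5_alt syllables_nb tones
instance (syllables_nb : Int) (tones : List String) (out : List String) : Decidable (Spec_apply_rule_5 syllables_nb tones out) := by unfold Spec_apply_rule_5; infer_instance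

-- ===== CLAIM (what is proved, stated in full; the proofs are below) =====
def Claim_equal_apply_rule_5 : Prop := ∀ (syllables_nb : Int) (tones : List String), Dom_apply_rule_5 syllables_nb tones → Spec_apply_rule_5 syllables_nb tones (apply_rule_5 syllables_nb tones)

-- ===== LEMMAS AND PROOFS =====

-- once triggered, B rewrites the whole rest to "L"
theorem bLoopB_true (n : Nat) : ∀ (l : List String) (i : Nat),
    bLoopB n i true l = List.replicate l.length "L" := by
  intro l
  induction l with
  | nil => intro i; simp [bLoopB]
  | cons t rest ih => intro i; simp [bLoopB, List.replicate, ih]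

-- past the last trigger-eligible index the flag can never be set, so B copies
theorem bLoopB_past (n : Nat) : ∀ (l : List String) (i : Nat), n ≤ i + 1 →
    bLoopB n i false l = l := by
  intro l
  induction l with
  | nil => intro i _; simp [bLoopB]
  | cons t rest ih =>
      intro i h
      have hg : ¬ (i + 1 < n) := by omega
      simp [bLoopB, hg, ih (i + 1) (by omega)]

-- A's inner fill loop sets every position from s on to "L"
theorem fill_eq (l : List String) : ∀ (s : Nat), s ≤ l.length →
    (List.range' s (l.length - s)).foldl (fun acc j => acc.set j "L") l
      = l.take s ++ List.replicate (l.length - s) "L" := by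
  intro s
  induction hk : l.length - s generalizing l s with
  | zero =>
      intro hs
      simp_all
      omega
  | succ m ih =>
      intro hs
      have hsl : s < l.length := by omega
      rw [List.range'_succ]
      simp only [List.foldl_cons]
      have ih' := ih (l.set s "L") (s + 1) (by simp; omega) (by simp; omega)
      rw [ih']
      have htake : (l.set s "L").take (s + 1) = l.take s ++ ["L"] := by
        rw [List.take_add_one]
        simp [List.take_set, hsl, List.set_eq_of_length_le]
      rw [htake, List.append_assoc]
      simp [List.replicate_succ]

-- main invariant relating A's search-from-i to B's pass over the suffix
theorem main_inv (tones : List String) : ∀ (i : Nat),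
    aLoopA tones tones i
      = tones.take i ++ bLoopB tones.length i false (tones.drop i) := by
  intro i
  induction hk : tones.length - i generalizing i with
  | zero =>
      have hni : ¬ (i < tones.length - 1) := by omega
      rw [aLoopA]
      simp only [hni, if_false]
      rw [bLoopB_past tones.length _ i (by omega)]
      simp
  | succ m ih =>
      by_cases hlt : i < tones.length - 1
      · have hi : i < tones.length := by omega
        have hdrop : tones.drop i = tones[i] :: tones.drop (i + 1) :=
          List.drop_eq_getElem_cons hi
        have hguard : (decide (i + 1 < tones.length)) = true := by
          simp; omega
        rw [aLoopA]
        simp only [hlt, if_true]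
        have hgetD : tones.getD i "" = tones[i] := by
          simp [List.getD, List.getElem?_eq_getElem hi]
        by_cases htrig : tones[i] = "HL" ∨ tones[i] = "ML"
        · -- trigger fires at i
          rw [if_pos (by rw [hgetD]; exact htrig)]
          rw [fill_eq tones (i + 1) (by omega)]
          rw [hdrop]
          simp only [bLoopB, hguard, Bool.false_or, Bool.true_and]
          have hb : (tones[i] == "HL" || tones[i] == "ML") = true := by
            rcases htrig with h | h <;> simp [h]
          rw [hb, bLoopB_true]
          have : tones.take (i + 1) = tones.take i ++ [tones[i]] := by
            rw [List.take_add_one]; simp [List.getElem?_eq_getElem hi]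
          simp only [List.length_drop]
          rw [this, List.append_assoc]
          simp
        · -- no trigger at i: recurse
          rw [if_neg (by rw [hgetD]; exact htrig)]
          rw [ih (i + 1) (by omega)]
          rw [hdrop]
          simp only [bLoopB, hguard, Bool.false_or, Bool.true_and]
          have hb : (tones[i] == "HL" || tones[i] == "ML") = false := by
            rw [not_or] at htrig
            simp [htrig.1, htrig.2]
          rw [hb]
          have : tones.take (i + 1) = tones.take i ++ [tones[i]] := by
            rw [List.take_add_one]; simp [List.getElem?_eq_getElem hi]
          rw [this, List.append_assoc]
          simp
      · rw [aLoopA]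
        simp only [hlt, if_false]
        rw [bLoopB_past tones.length _ i (by omega)]
        simp

-- ===== VERDICT (by name: the statement is the Claim_ definition above) =====
theorem apply_rule_5_spec : Claim_equal_apply_rule_5 := by
  intro syllables_nb tones _
  unfold Spec_apply_rule_5 apply_rule_5 apply_rule_5_alt
  simpa using main_inv tones 0
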